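-- pv_equiv track=rewrite | github.com/henry-luo/lambda | utils/analyze_binary.py | compute_symbol_sizes
-- ===== SOURCE A (Python) =====
-- def find_section_end(addr, sections):
--     """Return the end address of the section containing `addr`."""
--     for s_start, s_end, _, _ in sections:
--         if s_start <= addr < s_end:
--             return s_end
--     return None
--
-- def compute_symbol_sizes(sorted_addrs, sections):
--     """
--     Compute estimated size for each symbol.
--
--     Uses consecutive-address differencing, but caps each symbol at its
--     section's end boundary.  This prevents the catastrophic overcounts
--     that occur when the next visible symbol is in a different section
--     (sometimes megabytes away).
--
--     Returns: {name: size_bytes}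
--     """
--     sizes = {}
--     n = len(sorted_addrs)
--
--     for idx in range(n):
--         addr, name = sorted_addrs[idx]
--
--         # find the end of the section this symbol lives in
--         sec_end = find_section_end(addr, sections)
--
--         if idx + 1 < n:
--             next_addr = sorted_addrs[idx + 1][0]
--             # cap at section boundary
--             if sec_end is not None and next_addr > sec_end:
--                 raw_size = sec_end - addr
--             else:
--                 raw_size = next_addr - addr
--         else:
--             # last symbol
--             raw_size = (sec_end - addr) if sec_end else 0
--
--         sizes[name] = max(raw_size, 0)
--
--     return sizes
-- ===== SOURCE B (Python) =====
-- def compute_symbol_sizes(sorted_addrs, sections):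
--     # Phase 1: resolve each distinct address to the end of the first section
--     # containing it (section-major sweep with a memo dict, instead of A's
--     # per-symbol rescan of the section list).
--     addr_set = set(a for a, _ in sorted_addrs)
--     end_of = {}
--     for s_start, s_end, _, _ in sections:
--         for a in addr_set:
--             if s_start <= a < s_end and a not in end_of:
--                 end_of[a] = s_end
--     # Phase 2: one pairwise pass; the cap rule is just min(next, section_end).
--     sizes = {}
--     nexts = [a for a, _ in sorted_addrs[1:]] + [None]
--     for (addr, name), nxt in zip(sorted_addrs, nexts):
--         sec_end = end_of.get(addr)
--         if nxt is None:
--             raw = sec_end - addr if sec_end is not None else 0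
--         elif sec_end is None:
--             raw = nxt - addr
--         else:
--             raw = min(nxt, sec_end) - addr
--         sizes[name] = max(raw, 0)
--     return sizes
-- ===== Notes on version B (the rewrite author's own statement) =====
-- stated objective: alternative
-- what changed: B replaces A's per-symbol rescan of the section list with a section-major sweep that memoises each distinct address's first-matching section end in a dict, and collapses A's cap branching into min(next_addr, sec_end); sizes are then emitted in one pairwise zip pass.
-- intended difference: On inputs whose last symbol lies in a first-matching section whose end address is 0 (only reachable with negative addresses), A's '(sec_end - addr) if sec_end else 0' treats the end 0 as falsy and returns size 0 for that symbol, while B returns the intended capped size sec_end - addr. — e.g. on compute_symbol_sizes([(-2, "f")], [(-5, 0, 0, 0)]): A returns [("f", 0)], B returns [("f", 2)]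
import Mathlib
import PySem

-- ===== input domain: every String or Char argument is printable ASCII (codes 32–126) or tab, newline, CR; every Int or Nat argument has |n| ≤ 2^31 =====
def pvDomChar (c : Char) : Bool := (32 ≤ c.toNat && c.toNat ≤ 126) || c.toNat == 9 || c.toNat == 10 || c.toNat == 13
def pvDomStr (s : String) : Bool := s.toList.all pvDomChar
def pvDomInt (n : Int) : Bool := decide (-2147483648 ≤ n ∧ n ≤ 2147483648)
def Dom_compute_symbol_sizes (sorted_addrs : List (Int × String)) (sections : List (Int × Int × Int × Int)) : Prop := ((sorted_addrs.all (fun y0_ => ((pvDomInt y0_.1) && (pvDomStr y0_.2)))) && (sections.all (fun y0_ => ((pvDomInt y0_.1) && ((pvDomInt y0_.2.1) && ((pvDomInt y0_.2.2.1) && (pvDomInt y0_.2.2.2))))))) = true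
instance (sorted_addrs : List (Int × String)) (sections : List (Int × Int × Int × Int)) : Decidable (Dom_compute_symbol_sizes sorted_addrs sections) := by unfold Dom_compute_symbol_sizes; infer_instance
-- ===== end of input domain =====

-- B resolves section ends section-major into a memo dict and folds A's cap rule into min(next, sec_end)
-- (objective: alternative); on the falsy-zero corner stated as D_ below, B returns the intended value.

-- ===== PORT A =====
def find_section_end (addr : Int) : List (Int × Int × Int × Int) → Option Int
  | [] => none
  | q :: rest => if q.1 ≤ addr ∧ addr < q.2.1 then some q.2.1 else find_section_end addr rest

def pv_a_body (sorted_addrs : List (Int × String)) (sections : List (Int × Int × Int × Int)) (n : Int)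
    (sizes : PySem.Dict String Int) (idx : Int) : PySem.Dict String Int :=
  let p := PySem.List.pyGetD sorted_addrs idx (0, "")
  let addr := p.1
  let name := p.2
  let sec_end := find_section_end addr sections
  let raw : Int :=
    if idx + 1 < n then
      let next_addr := (PySem.List.pyGetD sorted_addrs (idx + 1) (0, "")).1
      match sec_end with
      | some e => if next_addr > e then e - addr else next_addr - addr
      | none => next_addr - addr
    else
      -- '(sec_end - addr) if sec_end else 0': Python truthiness, a section end equal to 0 is falsy
      match sec_end with
      | some e => if e ≠ 0 then e - addr else 0
      | none => 0
  sizes.insert name (max raw 0)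

def compute_symbol_sizes (sorted_addrs : List (Int × String)) (sections : List (Int × Int × Int × Int)) : List (String × Int) :=
  let n : Int := PySem.List.len sorted_addrs
  ((PySem.List.pyRange 0 n).foldl (pv_a_body sorted_addrs sections n) PySem.Dict.empty).items

-- ===== PORT B =====
def pv_build_end (sorted_addrs : List (Int × String)) (sections : List (Int × Int × Int × Int)) : PySem.Dict Int Int :=
  let addr_set : PySem.Set Int := PySem.Set.ofList (sorted_addrs.map (fun p => p.1))
  sections.foldl (fun eo q =>
    addr_set.foldl (fun (eo : PySem.Dict Int Int) a =>
      if q.1 ≤ a ∧ a < q.2.1 ∧ eo.contains a = false then eo.insert a q.2.1 else eo) eo)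
    PySem.Dict.empty

def pv_b_body (end_of : PySem.Dict Int Int) (sizes : PySem.Dict String Int)
    (pc : (Int × String) × Option Int) : PySem.Dict String Int :=
  let addr := pc.1.1
  let name := pc.1.2
  let sec_end := end_of.get? addr
  let raw : Int :=
    match pc.2 with
    | none => match sec_end with | some e => e - addr | none => 0
    | some nxt => match sec_end with | none => nxt - addr | some e => min nxt e - addr
  sizes.insert name (max raw 0)

def compute_symbol_sizes_alt (sorted_addrs : List (Int × String)) (sections : List (Int × Int × Int × Int)) : List (String × Int) :=
  let end_of := pv_build_end sorted_addrs sections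
  let nexts : List (Option Int) := (PySem.List.slice sorted_addrs (some 1) none).map (fun p => some p.1) ++ [none]
  ((sorted_addrs.zip nexts).foldl (pv_b_body end_of) PySem.Dict.empty).items

-- ===== PRECONDITION & SPEC =====
-- On inputs whose LAST symbol lies in a (first-matching) section whose end address is 0, A's Python
-- '(sec_end - addr) if sec_end else 0' treats that end as falsy and returns size 0 for the last symbol,
-- while B returns the intended capped size sec_end - addr; everywhere else A = B.
def D_compute_symbol_sizes (sorted_addrs : List (Int × String)) (sections : List (Int × Int × Int × Int)) : Prop :=
  (match sorted_addrs.getLast? with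
   | none => false
   | some p =>
     match sections.find? (fun q => decide (q.1 ≤ p.1 ∧ p.1 < q.2.1)) with
     | some q => q.2.1 == 0
     | none => false) = true
instance (sorted_addrs : List (Int × String)) (sections : List (Int × Int × Int × Int)) : Decidable (D_compute_symbol_sizes sorted_addrs sections) := by unfold D_compute_symbol_sizes; infer_instance

def Spec_compute_symbol_sizes (sorted_addrs : List (Int × String)) (sections : List (Int × Int × Int × Int)) (out : List (String × Int)) : Prop := ¬ D_compute_symbol_sizes sorted_addrs sections → out = compute_symbol_sizes_alt sorted_addrs sections
instance (sorted_addrs : List (Int × String)) (sections : List (Int × Int × Int × Int)) (out : List (String × Int)) : Decidable (Spec_compute_symbol_sizes sorted_addrs sections out) := by unfold Spec_compute_symbol_sizes; infer_instance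

def pvDiffWitness_compute_symbol_sizes : (List (Int × String)) × (List (Int × Int × Int × Int)) :=
  ([(-2, "f")], [(-5, 0, 0, 0)])
def pvDiffWitnessOut_compute_symbol_sizes : (List (String × Int)) × (List (String × Int)) :=
  ([("f", 0)], [("f", 2)])

-- ===== CLAIM (what is proved, stated in full; the proofs are below) =====
def Claim_unchanged_compute_symbol_sizes : Prop := ∀ (sorted_addrs : List (Int × String)) (sections : List (Int × Int × Int × Int)), Dom_compute_symbol_sizes sorted_addrs sections → Spec_compute_symbol_sizes sorted_addrs sections (compute_symbol_sizes sorted_addrs sections)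
def Claim_changed_compute_symbol_sizes : Prop := Dom_compute_symbol_sizes (pvDiffWitness_compute_symbol_sizes.1) (pvDiffWitness_compute_symbol_sizes.2) ∧ D_compute_symbol_sizes (pvDiffWitness_compute_symbol_sizes.1) (pvDiffWitness_compute_symbol_sizes.2) ∧ compute_symbol_sizes (pvDiffWitness_compute_symbol_sizes.1) (pvDiffWitness_compute_symbol_sizes.2) = pvDiffWitnessOut_compute_symbol_sizes.1 ∧ compute_symbol_sizes_alt (pvDiffWitness_compute_symbol_sizes.1) (pvDiffWitness_compute_symbol_sizes.2) = pvDiffWitnessOut_compute_symbol_sizes.2 ∧ pvDiffWitnessOut_compute_symbol_sizes.1 ≠ pvDiffWitnessOut_compute_symbol_sizes.2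
def Claim_exact_compute_symbol_sizes : Prop := ∀ (sorted_addrs : List (Int × String)) (sections : List (Int × Int × Int × Int)), Dom_compute_symbol_sizes sorted_addrs sections → D_compute_symbol_sizes sorted_addrs sections → compute_symbol_sizes sorted_addrs sections ≠ compute_symbol_sizes_alt sorted_addrs sections

-- ===== LEMMAS AND PROOFS =====

-- B's pairwise zip list, in recursive form (proof-side helper)
def pvPairs : List (Int × String) → List ((Int × String) × Option Int)
  | [] => []
  | [p] => [(p, none)]
  | p :: q :: rest => (p, some q.1) :: pvPairs (q :: rest)

theorem pvPairs_eq_zip (sa : List (Int × String)) :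
    sa.zip ((PySem.List.slice sa (some 1) none).map (fun p => some p.1) ++ [none]) = pvPairs sa := by
  induction sa with
  | nil => rfl
  | cons x tail ih =>
    cases tail with
    | nil => rfl
    | cons y rest =>
      simp only [PySem.List.slice_from_one, List.tail_cons] at ih ⊢
      simp [List.zip, pvPairs, ← ih]

-- A's helper is the find?-projection D_ is phrased with
theorem find_section_end_eq_find? (a : Int) (sections : List (Int × Int × Int × Int)) :
    find_section_end a sections
      = (sections.find? (fun q => decide (q.1 ≤ a ∧ a < q.2.1))).map (fun q => q.2.1) := by
  induction sections with
  | nil => rfl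
  | cons q rest ih =>
    by_cases h : q.1 ≤ a ∧ a < q.2.1
    · simp [find_section_end, List.find?, h]
    · simp [find_section_end, List.find?, h, ih]

theorem pv_getD_append {α : Type} (pre : List α) (p : α) (l : List α) (d : α) :
    (pre ++ p :: l).getD pre.length d = p := by
  simp [List.getD_eq_getElem?_getD]

-- inner loop of pv_build_end: first-match memoisation over one section
theorem pv_inner_get? (s e x y : Int) (l : List Int) (eo : PySem.Dict Int Int) (a : Int) :
    ((l.foldl (fun (eo : PySem.Dict Int Int) b =>
        if (s, e, x, y).1 ≤ b ∧ b < (s, e, x, y).2.1 ∧ eo.contains b = false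
        then eo.insert b (s, e, x, y).2.1 else eo) eo).get? a)
      = if a ∈ l ∧ s ≤ a ∧ a < e ∧ eo.get? a = none then some e else eo.get? a := by
  induction l generalizing eo with
  | nil => simp
  | cons b t ih =>
    simp only [List.foldl_cons]
    by_cases hb : s ≤ b ∧ b < e ∧ eo.contains b = false
    · rw [if_pos hb, ih]
      by_cases hab : a = b
      · subst hab
        have h1 : eo.get? a = none := (PySem.Dict.get?_eq_none_iff_contains eo a).2 hb.2.2
        simp [PySem.Dict.get?_insert_self, hb.1, hb.2.1, h1, List.mem_cons]
      · rw [PySem.Dict.get?_insert_of_ne (hne := hab)]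
        simp only [List.mem_cons]
        split_ifs with h1 h2 h2 <;> first | rfl | (exfalso; tauto)
    · rw [if_neg hb, ih]
      simp only [List.mem_cons]
      have hcb : ¬ (a = b ∧ s ≤ a ∧ a < e ∧ eo.get? a = none) := by
        rintro ⟨rfl, hs, hlt, hn⟩
        exact hb ⟨hs, hlt, (PySem.Dict.get?_eq_none_iff_contains eo a).1 hn⟩
      split_ifs with h1 h2 h2 <;> first | rfl | (exfalso; tauto)

-- outer loop of pv_build_end
theorem pv_build_get? (sections : List (Int × Int × Int × Int)) (l : List Int)
    (eo : PySem.Dict Int Int) (a : Int) :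
    ((sections.foldl (fun eo q =>
        l.foldl (fun (eo : PySem.Dict Int Int) b =>
          if q.1 ≤ b ∧ b < q.2.1 ∧ eo.contains b = false then eo.insert b q.2.1 else eo) eo) eo).get? a)
      = match eo.get? a with
        | some v => some v
        | none => if a ∈ l then find_section_end a sections else none := by
  induction sections generalizing eo with
  | nil =>
    simp only [List.foldl_nil]
    cases eo.get? a <;> simp [find_section_end]
  | cons q rest ih =>
    obtain ⟨s, e, x, y⟩ := q
    simp only [List.foldl_cons]
    rw [ih, pv_inner_get? s e x y]
    by_cases hmem : a ∈ l
    · by_cases hq : s ≤ a ∧ a < e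
      · cases hget : eo.get? a with
        | some v => simp [hmem, hq]
        | none => simp [hmem, hq, find_section_end]
      · cases hget : eo.get? a with
        | some v => simp
        | none =>
          simp [hmem, find_section_end, hq]
    · have : ¬ (a ∈ l ∧ s ≤ a ∧ a < e ∧ eo.get? a = none) := by tauto
      simp only [if_neg this]
      cases eo.get? a <;> simp [hmem]

theorem pv_build_end_get? (sorted_addrs : List (Int × String)) (sections : List (Int × Int × Int × Int))
    (a : Int) (ha : a ∈ sorted_addrs.map Prod.fst) :
    (pv_build_end sorted_addrs sections).get? a = find_section_end a sections := by
  unfold pv_build_end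
  rw [pv_build_get?]
  rw [PySem.Dict.get?_empty]
  have : a ∈ (PySem.Set.ofList (sorted_addrs.map (fun p => p.1)) : List Int) := by
    rw [PySem.Set.mem_ofList]
    simpa using ha
  simp [this]

-- main loop correspondence: A's index loop from position pre.length equals B's pairwise fold over cur
theorem pv_main (full : List (Int × String)) (sections : List (Int × Int × Int × Int))
    (eo : PySem.Dict Int Int)
    (heo : ∀ a ∈ full.map Prod.fst, eo.get? a = find_section_end a sections)
    (hD : ¬ D_compute_symbol_sizes full sections) :
    ∀ (cur pre : List (Int × String)) (sizes : PySem.Dict String Int), full = pre ++ cur →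
      (PySem.List.pyRange (pre.length : Int) (full.length : Int)).foldl
          (pv_a_body full sections (full.length : Int)) sizes
        = (pvPairs cur).foldl (pv_b_body eo) sizes := by
  intro cur
  induction cur with
  | nil =>
    intro pre sizes hfull
    have hl : (pre.length : Int) = (full.length : Int) := by rw [hfull]; simp
    rw [hl]
    have hr : PySem.List.pyRange (full.length : Int) (full.length : Int) = [] := by simp [pysem]
    rw [hr]
    rfl
  | cons x tail ih =>
    cases tail with
    | nil =>
      intro pre sizes hfull
      have hflen : full.length = pre.length + 1 := by
        rw [hfull]; simp only [List.length_append, List.length_cons, List.length_nil]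
      have hlen : (full.length : Int) = (pre.length : Int) + 1 := by omega
      rw [hlen, PySem.List.pyRange_one_succ_right (le_refl _)]
      have hr : PySem.List.pyRange (pre.length : Int) (pre.length : Int) = [] := by simp [pysem]
      rw [hr]
      simp only [List.nil_append, List.foldl_cons, List.foldl_nil, pvPairs]
      have hx : PySem.List.pyGetD full ((pre.length : Nat) : Int) (0, "") = x := by
        rw [PySem.List.pyGetD_natCast, hfull, pv_getD_append]
      have hlook : eo.get? x.1 = find_section_end x.1 sections := by
        apply heo; rw [hfull]; simp
      have hlast : full.getLast? = some x := by rw [hfull]; exact List.getLast?_concat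
      simp only [pv_a_body, pv_b_body, hx, hlook]
      rw [if_neg (show ¬ ((pre.length : Int) + 1 < (pre.length : Int) + 1) by omega)]
      cases hfse : find_section_end x.1 sections with
      | none => rfl
      | some e =>
        have hne : e ≠ 0 := by
          intro he
          apply hD
          unfold D_compute_symbol_sizes
          rw [find_section_end_eq_find?] at hfse
          obtain ⟨q, hq, hqe⟩ := Option.map_eq_some_iff.1 hfse
          simp only [hlast]
          rw [hq]
          simp [hqe, he]
        simp [hne]
    | cons y rest =>
      intro pre sizes hfull
      have hflen : full.length = pre.length + 2 + rest.length := by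
        rw [hfull]; simp only [List.length_append, List.length_cons]; omega
      have hlt : (pre.length : Int) < (full.length : Int) := by omega
      rw [PySem.List.pyRange_one_cons hlt]
      simp only [List.foldl_cons, pvPairs]
      have hx : PySem.List.pyGetD full ((pre.length : Nat) : Int) (0, "") = x := by
        rw [PySem.List.pyGetD_natCast, hfull, pv_getD_append]
      have hy : PySem.List.pyGetD full ((pre.length : Int) + 1) (0, "") = y := by
        have hax : (pre ++ [x]).length = pre.length + 1 := by simp
        have : (pre.length : Int) + 1 = (((pre ++ [x]).length : Nat) : Int) := by omega
        rw [this, PySem.List.pyGetD_natCast]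
        have : full = (pre ++ [x]) ++ y :: rest := by rw [hfull]; simp
        rw [this, pv_getD_append]
      have hlook : eo.get? x.1 = find_section_end x.1 sections := by
        apply heo; rw [hfull]; simp
      have hstep : pv_a_body full sections (full.length : Int) sizes (pre.length : Int)
          = pv_b_body eo sizes (x, some y.1) := by
        simp only [pv_a_body, pv_b_body, hx, hy, hlook]
        have hcond : (pre.length : Int) + 1 < (full.length : Int) := by omega
        rw [if_pos hcond]
        cases find_section_end x.1 sections with
        | none => rfl
        | some e =>
          have : (if y.1 > e then e - x.1 else y.1 - x.1) = min y.1 e - x.1 := by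
            by_cases h : y.1 ≤ e
            · rw [if_neg (by omega), min_eq_left h]
            · rw [if_pos (by omega), min_eq_right (by omega)]
          simp [this]
      rw [hstep]
      have hrec := ih (pre ++ [x]) (pv_b_body eo sizes (x, some y.1)) (by rw [hfull]; simp)
      have hax : (pre ++ [x]).length = pre.length + 1 := by simp
      rw [hax] at hrec
      push_cast at hrec
      rw [← hrec]

-- last-step evaluation of A's loop, used for tightness
theorem pv_a_last (sa : List (Int × String)) (sections : List (Int × Int × Int × Int))
    (p : Int × String) (hlast : sa.getLast? = some p)
    (hfse : find_section_end p.1 sections = some 0) :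
    ((PySem.List.pyRange 0 (sa.length : Int)).foldl (pv_a_body sa sections (sa.length : Int))
        PySem.Dict.empty).get? p.2 = some 0 := by
  obtain ⟨init, rfl⟩ := List.getLast?_eq_some_iff.mp hlast
  have hflen : (init ++ [p]).length = init.length + 1 := by simp
  have hlen : ((init ++ [p]).length : Int) = (init.length : Int) + 1 := by omega
  rw [hlen, PySem.List.pyRange_one_succ_right (by positivity), List.foldl_append]
  simp only [List.foldl_cons, List.foldl_nil]
  have hx : PySem.List.pyGetD (init ++ [p]) ((init.length : Nat) : Int) (0, "") = p := by
    rw [PySem.List.pyGetD_natCast, pv_getD_append]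
  simp only [pv_a_body, hx, hfse]
  rw [if_neg (show ¬ ((init.length : Int) + 1 < (init.length : Int) + 1) by omega)]
  simp [PySem.Dict.get?_insert_self]

-- last-step evaluation of B's loop, used for tightness
theorem pv_b_last (eo : PySem.Dict Int Int) (sa : List (Int × String)) (p : Int × String)
    (hlast : sa.getLast? = some p) (hget : eo.get? p.1 = some 0) :
    ∀ d : PySem.Dict String Int,
      ((pvPairs sa).foldl (pv_b_body eo) d).get? p.2 = some (max (0 - p.1) 0) := by
  induction sa with
  | nil => simp at hlast
  | cons x tail ih =>
    cases tail with
    | nil =>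
      intro d
      simp only [List.getLast?_singleton, Option.some.injEq] at hlast
      subst hlast
      simp only [pvPairs, List.foldl_cons, List.foldl_nil, pv_b_body, hget]
      simp [PySem.Dict.get?_insert_self]
    | cons y rest =>
      intro d
      have hlast' : (y :: rest).getLast? = some p := by
        rw [← hlast]; exact (List.getLast?_cons_cons ..).symm
      simp only [pvPairs, List.foldl_cons]
      exact ih hlast' _

-- ===== VERDICT (by name: the statements are the Claim_ definitions above) =====
theorem compute_symbol_sizes_spec : Claim_unchanged_compute_symbol_sizes := by
  intro sa secs _
  unfold Spec_compute_symbol_sizes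
  intro hD
  unfold compute_symbol_sizes compute_symbol_sizes_alt
  simp only [PySem.List.len_eq]
  rw [pvPairs_eq_zip]
  have := pv_main sa secs (pv_build_end sa secs)
      (fun a ha => pv_build_end_get? sa secs a ha) hD sa [] PySem.Dict.empty rfl
  simp only [List.length_nil, Nat.cast_zero] at this
  rw [this]

theorem compute_symbol_sizes_changed : Claim_changed_compute_symbol_sizes := by
  unfold Claim_changed_compute_symbol_sizes; decide

theorem compute_symbol_sizes_tight : Claim_exact_compute_symbol_sizes := by
  intro sa secs _ hD hEq
  unfold D_compute_symbol_sizes at hD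
  obtain ⟨p, hlast⟩ : ∃ p, sa.getLast? = some p := by
    cases h : sa.getLast? with
    | none => rw [h] at hD; simp at hD
    | some p => exact ⟨p, rfl⟩
  rw [hlast] at hD
  have hD' : (match secs.find? (fun q => decide (q.1 ≤ p.1 ∧ p.1 < q.2.1)) with
      | some q => (q.2.1 == 0) | none => false) = true := hD
  obtain ⟨q, hq⟩ : ∃ q, secs.find? (fun q => decide (q.1 ≤ p.1 ∧ p.1 < q.2.1)) = some q := by
    cases h : secs.find? (fun q => decide (q.1 ≤ p.1 ∧ p.1 < q.2.1)) with
    | none => rw [h] at hD'; simp at hD'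
    | some q => exact ⟨q, rfl⟩
  rw [hq] at hD'
  have hq0 : q.2.1 = 0 := by simpa using hD'
  have hppred : q.1 ≤ p.1 ∧ p.1 < q.2.1 := by
    have := List.find?_some hq
    simpa using this
  have hpneg : p.1 < 0 := by omega
  have hfse : find_section_end p.1 secs = some 0 := by
    rw [find_section_end_eq_find?, hq]
    simp [hq0]
  have hbmem : p.1 ∈ sa.map Prod.fst := by
    have : p ∈ sa := List.mem_of_getLast? hlast
    exact List.mem_map_of_mem this
  have hbget : (pv_build_end sa secs).get? p.1 = some 0 := by
    rw [pv_build_end_get? sa secs p.1 hbmem, hfse]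
  have hA : ((compute_symbol_sizes sa secs).find? (fun pr => pr.1 == p.2)).map Prod.snd = some 0 := by
    unfold compute_symbol_sizes
    simp only [PySem.List.len_eq]
    have := pv_a_last sa secs p hlast hfse
    simpa [PySem.Dict.get?] using this
  have hB : ((compute_symbol_sizes_alt sa secs).find? (fun pr => pr.1 == p.2)).map Prod.snd
      = some (max (0 - p.1) 0) := by
    unfold compute_symbol_sizes_alt
    simp only [pvPairs_eq_zip]
    have := pv_b_last (pv_build_end sa secs) sa p hlast hbget PySem.Dict.empty
    simpa [PySem.Dict.get?] using this
  rw [hEq, hB] at hA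
  have : max (0 - p.1) 0 = -p.1 := by omega
  rw [this] at hA
  simp only [Option.some.injEq] at hA
  omega
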